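-- pv_equiv track=rewrite | github.com/ritik-sri/LeetCode-Problem-Solution-in-PYTHON | Minimum Days - GFG/minimum-days.py | getMinimumDays
-- ===== SOURCE A (Python) =====
-- from typing import List
--
-- def getMinimumDays(N : int, S : str, P : List[int]) -> int:
--     # code here
--     cons=0
--     for i in range(len(S)-1):
--         if(S[i]==S[i+1]):
--             cons+=1
--     S=list(S)
--     if cons==0:
--         return 0
--     for i in range(N):
--         index=P[i]
--         if(index !=0 and S[index]==S[index-1]):
--             cons-=1
--         if(index!=N-1 and S[index]==S[index+1]):
--             cons-=1
--         if(cons==0):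
--             return i+1
--         S[index]='?'
--     return -1
-- ===== SOURCE B (Python) =====
-- from typing import List
--
-- def getMinimumDays(N: int, S: str, P: List[int]) -> int:
--     n = len(S)
--
--     def has_live_pair(removed):
--         return any(S[j] == S[j + 1] and not removed[j] and not removed[j + 1]
--                    for j in range(n - 1))
--
--     if not has_live_pair([False] * n):
--         return 0
--     removed = [False] * n
--     for i in range(N):
--         removed[P[i]] = True
--         if not has_live_pair(removed):
--             return i + 1
--     return -1
-- ===== Notes on version B (the rewrite author's own statement) =====
-- stated objective: alternative
-- what changed: B replaces A's incremental counter maintained by writing '?' sentinels into a char list with a boolean removed-array and a full recount of live adjacent equal pairs after each removal, which avoids the sentinel collisions entirely.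
-- outside the precondition, e.g. on getMinimumDays(1, 'aa', [0]): A returns -1, B returns 1; on getMinimumDays(3, 'a??', [0, 1, 2]): A returns -1, B returns 2; on getMinimumDays(4, 'abdd', [0, 1, 0, 2]): A returns 3, B returns 4
import Mathlib
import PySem

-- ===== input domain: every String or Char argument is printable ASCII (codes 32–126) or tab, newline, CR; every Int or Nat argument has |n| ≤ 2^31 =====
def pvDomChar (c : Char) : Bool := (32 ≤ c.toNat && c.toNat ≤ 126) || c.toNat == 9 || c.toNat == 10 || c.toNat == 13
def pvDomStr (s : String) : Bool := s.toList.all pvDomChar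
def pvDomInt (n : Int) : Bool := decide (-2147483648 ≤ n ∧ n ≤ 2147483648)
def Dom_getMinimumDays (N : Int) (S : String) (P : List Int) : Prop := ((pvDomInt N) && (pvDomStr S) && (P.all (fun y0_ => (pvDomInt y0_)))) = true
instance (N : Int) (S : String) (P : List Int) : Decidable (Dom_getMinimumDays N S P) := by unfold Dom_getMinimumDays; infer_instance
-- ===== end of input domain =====

-- B replaces A's incrementally maintained counter with '?'-sentinel writes by a removed-array
-- and a full recount of live adjacent equal pairs after each removal (objective: alternative).

-- ===== PORT A =====
def pvAConsCount (cs : List Char) : Int :=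
  (PySem.List.pyRange 0 ((cs.length : Int) - 1) 1).foldl
    (fun cons i => if PySem.List.pyGet? cs i = PySem.List.pyGet? cs (i + 1) then cons + 1 else cons) 0

def pvALoop (P : List Int) (N : Int) : List Int → List Char → Int → Int
  | [], _, _ => -1
  | i :: is, cs, cons =>
    let index := PySem.List.pyGetD P i 0
    let cons1 := if index ≠ 0 ∧ PySem.List.pyGet? cs index = PySem.List.pyGet? cs (index - 1) then cons - 1 else cons
    let cons2 := if index ≠ N - 1 ∧ PySem.List.pyGet? cs index = PySem.List.pyGet? cs (index + 1) then cons1 - 1 else cons1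
    if cons2 = 0 then i + 1
    else pvALoop P N is (PySem.List.pySetD cs index '?') cons2

def getMinimumDays (N : Int) (S : String) (P : List Int) : Int :=
  let cons := pvAConsCount S.toList
  if cons = 0 then 0
  else pvALoop P N (PySem.List.pyRange 0 N 1) S.toList cons

-- ===== PORT B =====
def pvBLive (cs : List Char) (removed : List Bool) : Bool :=
  (PySem.List.pyRange 0 ((cs.length : Int) - 1) 1).any
    (fun j => (PySem.List.pyGet? cs j == PySem.List.pyGet? cs (j + 1)) &&
      !(PySem.List.pyGetD removed j false) && !(PySem.List.pyGetD removed (j + 1) false))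

def pvBLoop (cs : List Char) (P : List Int) : List Int → List Bool → Int
  | [], _ => -1
  | i :: is, removed =>
    let removed' := PySem.List.pySetD removed (PySem.List.pyGetD P i 0) true
    if pvBLive cs removed' = false then i + 1
    else pvBLoop cs P is removed'

def getMinimumDays_alt (N : Int) (S : String) (P : List Int) : Int :=
  if pvBLive S.toList (List.replicate S.toList.length false) = false then 0
  else pvBLoop S.toList P (PySem.List.pyRange 0 N 1) (List.replicate S.toList.length false)

-- ===== PRECONDITION & SPEC =====
-- Pre_ admits every input on which A returns before its removal loop does real work
-- (N ≤ 0, or S without adjacent equal chars) plus the task's natural domain (N = len(S),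
-- a duplicate-free list of N in-range non-negative positions, no '?' in S): outside it A
-- either raises (N > len(P), an index outside [-len(S), len(S))) or returns an accidental
-- value of its '?'-sentinel bookkeeping and of its use of N both as the day count and as
-- the right boundary (N ≠ len(S), duplicate indices, negative in-range indices, '?'
-- already present in S).
def Pre_getMinimumDays (N : Int) (S : String) (P : List Int) : Prop :=
  N ≤ 0 ∨ List.IsChain (· ≠ ·) S.toList ∨
  (N = (S.toList.length : Int) ∧ N ≤ (P.length : Int) ∧
    (∀ p ∈ P.take S.toList.length, 0 ≤ p ∧ p < N) ∧
    (P.take S.toList.length).Nodup ∧ '?' ∉ S.toList)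

instance (N : Int) (S : String) (P : List Int) : Decidable (Pre_getMinimumDays N S P) := by
  unfold Pre_getMinimumDays; infer_instance

def pvWitness_getMinimumDays : Int × String × List Int := (2, "ab", [0, 1])

def Spec_getMinimumDays (N : Int) (S : String) (P : List Int) (out : Int) : Prop := out = getMinimumDays_alt N S P
instance (N : Int) (S : String) (P : List Int) (out : Int) : Decidable (Spec_getMinimumDays N S P out) := by unfold Spec_getMinimumDays; infer_instance

-- ===== CLAIM (what is proved, stated in full; the proofs are below) =====
def Claim_equal_getMinimumDays : Prop := ∀ (N : Int) (S : String) (P : List Int), Dom_getMinimumDays N S P → Pre_getMinimumDays N S P → Spec_getMinimumDays N S P (getMinimumDays N S P)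

-- ===== LEMMAS AND PROOFS =====

-- proof-side model: a Bool mask of removed positions, the masked char list A works on,
-- liveness of the adjacent pair starting at j, and the count of live pairs
def pvMask (cs : List Char) (R : List Bool) : List Char :=
  List.zipWith (fun c r => if r then '?' else c) cs R

def pvLiveB (cs : List Char) (R : List Bool) (j : Nat) : Bool :=
  (cs.getD j ' ' == cs.getD (j + 1) ' ') && !(R.getD j false) && !(R.getD (j + 1) false)

def pvCnt (cs : List Char) (R : List Bool) : Int :=
  ∑ j ∈ Finset.range (cs.length - 1), (if pvLiveB cs R j then (1 : Int) else 0)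

lemma pvMask_replicate (cs : List Char) : pvMask cs (List.replicate cs.length false) = cs := by
  induction cs with
  | nil => rfl
  | cons c cs ih => simpa [pvMask, List.replicate_succ] using ih

lemma pvMask_getElem? (cs : List Char) (R : List Bool) (h : R.length = cs.length)
    (j : Nat) (hj : j < cs.length) :
    (pvMask cs R)[j]? = some (if R.getD j false then '?' else cs.getD j ' ') := by
  induction cs generalizing R j with
  | nil => simp at hj
  | cons c cs ih =>
    cases R with
    | nil => simp at h
    | cons r R =>
      cases j with
      | zero => simp [pvMask]
      | succ j =>
        simp only [pvMask, List.zipWith_cons_cons, List.getElem?_cons_succ, List.getD_cons_succ]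
        exact ih R (by simpa using h) j (by simpa using hj)

lemma pvMask_set (cs : List Char) (R : List Bool) (p : Nat) :
    (pvMask cs R).set p '?' = pvMask cs (R.set p true) := by
  induction cs generalizing R p with
  | nil => simp [pvMask]
  | cons c cs ih =>
    cases R with
    | nil => simp [pvMask]
    | cons r R =>
      cases p with
      | zero => simp [pvMask]
      | succ p =>
        simp only [pvMask, List.zipWith_cons_cons, List.set_cons_succ]
        exact congrArg (fun l => (if r then '?' else c) :: l) (ih R p)

lemma foldl_range_ite (m : Nat) (p : Nat → Prop) [DecidablePred p] :
    (List.range m).foldl (fun (acc : Int) k => if p k then acc + 1 else acc) 0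
      = ∑ j ∈ Finset.range m, (if p j then (1 : Int) else 0) := by
  induction m with
  | zero => rfl
  | succ m ih =>
    rw [List.range_succ, List.foldl_append, Finset.sum_range_succ, ih]
    simp only [List.foldl_cons, List.foldl_nil]
    split_ifs <;> ring

lemma pvAConsCount_eq (cs : List Char) :
    pvAConsCount cs = pvCnt cs (List.replicate cs.length false) := by
  unfold pvAConsCount pvCnt
  rw [PySem.List.pyRange_one, List.foldl_map,
    foldl_range_ite _ (fun k => PySem.List.pyGet? cs ((0:Int) + k) = PySem.List.pyGet? cs ((0:Int) + k + 1))]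
  have hm : (((cs.length : Int) - 1) - 0).toNat = cs.length - 1 := by omega
  rw [hm]
  refine Finset.sum_congr rfl (fun j hj => ?_)
  have hj' : j < cs.length - 1 := Finset.mem_range.mp hj
  have h1 : j < cs.length := by omega
  have h2 : j + 1 < cs.length := by omega
  have e1 : (0:Int) + (j:Int) = ((j:Nat):Int) := by ring
  have e3 : ((j:Int)) + 1 = (((j+1):Nat):Int) := by push_cast; ring
  rw [e1] at *
  rw [e3, PySem.List.pyGet?_natCast, PySem.List.pyGet?_natCast,
    List.getElem?_eq_getElem h1, List.getElem?_eq_getElem h2]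
  simp [pvLiveB, h1, h2]

lemma pvBLive_cond_eq (cs : List Char) (R : List Bool) (j : Nat) (hj : j < cs.length - 1) :
    ((PySem.List.pyGet? cs (j:Int) == PySem.List.pyGet? cs ((j:Int) + 1)) &&
      !(PySem.List.pyGetD R (j:Int) false) && !(PySem.List.pyGetD R ((j:Int) + 1) false))
      = pvLiveB cs R j := by
  have h1 : j < cs.length := by omega
  have h2 : j + 1 < cs.length := by omega
  have e3 : ((j:Int)) + 1 = (((j+1):Nat):Int) := by push_cast; ring
  rw [e3, PySem.List.pyGet?_natCast, PySem.List.pyGet?_natCast,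
    PySem.List.pyGetD_natCast, PySem.List.pyGetD_natCast,
    List.getElem?_eq_getElem h1, List.getElem?_eq_getElem h2]
  simp [pvLiveB, List.getD_eq_getElem?_getD, List.getElem?_eq_getElem h1, List.getElem?_eq_getElem h2]

lemma pvBLive_true_iff (cs : List Char) (R : List Bool) :
    pvBLive cs R = true ↔ ∃ j : Nat, j < cs.length - 1 ∧ pvLiveB cs R j = true := by
  unfold pvBLive
  rw [List.any_eq_true]
  constructor
  · rintro ⟨i, him, hic⟩
    obtain ⟨h0, hlt⟩ := PySem.List.mem_pyRange_one.mp him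
    refine ⟨i.toNat, by omega, ?_⟩
    rw [← pvBLive_cond_eq cs R i.toNat (by omega)]
    have : ((i.toNat : Nat) : Int) = i := Int.toNat_of_nonneg h0
    rw [this]; exact hic
  · rintro ⟨j, hj, hl⟩
    refine ⟨(j:Int), PySem.List.mem_pyRange_one.mpr ⟨by positivity, by omega⟩, ?_⟩
    rw [pvBLive_cond_eq cs R j hj]; exact hl

lemma pvBLive_false_iff (cs : List Char) (R : List Bool) :
    pvBLive cs R = false ↔ pvCnt cs R = 0 := by
  constructor
  · intro hfa
    refine Finset.sum_eq_zero (fun j hj => ?_)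
    have : pvLiveB cs R j = false := by
      by_contra hc
      have := (pvBLive_true_iff cs R).mpr ⟨j, Finset.mem_range.mp hj, by simpa using hc⟩
      rw [hfa] at this; exact Bool.false_ne_true this
    simp [this]
  · intro hz
    by_contra hc
    obtain ⟨j, hjl, hjt⟩ := (pvBLive_true_iff cs R).mp (Bool.not_eq_false _ |>.mp hc)
    have hjr : j ∈ Finset.range (cs.length - 1) := Finset.mem_range.mpr hjl
    have hnonneg : ∀ i ∈ Finset.range (cs.length - 1), (0:Int) ≤ (if pvLiveB cs R i then (1:Int) else 0) := by
      intro i _; split_ifs <;> norm_num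
    have := (Finset.sum_eq_zero_iff_of_nonneg hnonneg).mp hz j hjr
    simp [hjt] at this

lemma pvGetMask (cs : List Char) (R : List Bool) (h : R.length = cs.length)
    (j : Nat) (hj : j < cs.length) :
    PySem.List.pyGet? (pvMask cs R) (j : Int)
      = some (if R.getD j false then '?' else cs.getD j ' ') := by
  rw [PySem.List.pyGet?_natCast, pvMask_getElem? cs R h j hj]

lemma pvGetD_ne_qmark (cs : List Char) (j : Nat) (hj : j < cs.length) (hq : '?' ∉ cs) :
    cs.getD j ' ' ≠ '?' := by
  intro hcontr
  exact hq (hcontr ▸ (List.getD_eq_getElem _ _ hj ▸ List.getElem_mem hj))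

lemma pvLeft_iff (cs : List Char) (R : List Bool) (p : Nat) (h : R.length = cs.length)
    (hp : p < cs.length) (hRp : R.getD p false = false) (hq : '?' ∉ cs) :
    ((p : Int) ≠ 0 ∧ PySem.List.pyGet? (pvMask cs R) (p : Int) = PySem.List.pyGet? (pvMask cs R) ((p : Int) - 1))
      ↔ (0 < p ∧ pvLiveB cs R (p - 1) = true) := by
  constructor
  · rintro ⟨hne, heq⟩
    have hppos : 0 < p := by omega
    have e : ((p:Int)) - 1 = (((p-1):Nat):Int) := by omega
    rw [e, pvGetMask cs R h p hp, pvGetMask cs R h (p-1) (by omega), hRp] at heq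
    simp only [Option.some_inj] at heq
    refine ⟨hppos, ?_⟩
    by_cases hr : R.getD (p-1) false
    · rw [hr] at heq; simp at heq
      exact absurd heq (pvGetD_ne_qmark cs p hp hq)
    · simp only [Bool.not_eq_true] at hr
      rw [hr] at heq; simp at heq
      have hpe : p - 1 + 1 = p := by omega
      rw [← List.getD_eq_getElem?_getD, ← List.getD_eq_getElem?_getD] at heq
      simp [pvLiveB, hpe, -List.getD_eq_getElem?_getD, hr, hRp, heq]
  · rintro ⟨hppos, hlive⟩
    have hpe : p - 1 + 1 = p := by omega
    simp only [pvLiveB, hpe, Bool.and_eq_true, Bool.not_eq_true', beq_iff_eq] at hlive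
    obtain ⟨⟨heq, hr1⟩, _⟩ := hlive
    refine ⟨by omega, ?_⟩
    have e : ((p:Int)) - 1 = (((p-1):Nat):Int) := by omega
    rw [e, pvGetMask cs R h p hp, pvGetMask cs R h (p-1) (by omega), hRp, hr1]
    simp only [Bool.false_eq_true, if_false, Option.some_inj]
    exact heq.symm

lemma pvRight_iff (cs : List Char) (R : List Bool) (p : Nat) (h : R.length = cs.length)
    (hp : p < cs.length) (hRp : R.getD p false = false) (hq : '?' ∉ cs) :
    ((p : Int) ≠ (cs.length : Int) - 1 ∧ PySem.List.pyGet? (pvMask cs R) (p : Int) = PySem.List.pyGet? (pvMask cs R) ((p : Int) + 1))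
      ↔ (p + 1 < cs.length ∧ pvLiveB cs R p = true) := by
  constructor
  · rintro ⟨hne, heq⟩
    have hlt : p + 1 < cs.length := by omega
    have e : ((p:Int)) + 1 = (((p+1):Nat):Int) := by omega
    rw [e, pvGetMask cs R h p hp, pvGetMask cs R h (p+1) (by omega), hRp] at heq
    simp only [Option.some_inj] at heq
    refine ⟨hlt, ?_⟩
    by_cases hr : R.getD (p+1) false
    · rw [hr] at heq; simp at heq
      exact absurd heq (pvGetD_ne_qmark cs p hp hq)
    · simp only [Bool.not_eq_true] at hr
      rw [hr] at heq; simp at heq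
      rw [← List.getD_eq_getElem?_getD, ← List.getD_eq_getElem?_getD] at heq
      simp [pvLiveB, -List.getD_eq_getElem?_getD, hr, hRp, heq]
  · rintro ⟨hlt, hlive⟩
    simp only [pvLiveB, Bool.and_eq_true, Bool.not_eq_true', beq_iff_eq] at hlive
    obtain ⟨⟨heq, _⟩, hr1⟩ := hlive
    refine ⟨by omega, ?_⟩
    have e : ((p:Int)) + 1 = (((p+1):Nat):Int) := by omega
    rw [e, pvGetMask cs R h p hp, pvGetMask cs R h (p+1) (by omega), hRp, hr1]
    simp only [Bool.false_eq_true, if_false, Option.some_inj]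
    exact heq

lemma pvGetD_set (R : List Bool) (p : Nat) (hp : p < R.length) (j : Nat) :
    (R.set p true).getD j false = if j = p then true else R.getD j false := by
  simp only [List.getD_eq_getElem?_getD, List.getElem?_set]
  rcases eq_or_ne j p with rfl | hne
  · simp [hp]
  · simp [hne, Ne.symm hne]

lemma pvCnt_set (cs : List Char) (R : List Bool) (p : Nat) (h : R.length = cs.length)
    (hp : p < cs.length) (hRp : R.getD p false = false) :
    pvCnt cs (R.set p true) =
      pvCnt cs R - (if 0 < p ∧ pvLiveB cs R (p - 1) then 1 else 0)
        - (if p + 1 < cs.length ∧ pvLiveB cs R p then 1 else 0) := by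
  have hset := pvGetD_set R p (h ▸ hp)
  have key : ∀ j ∈ Finset.range (cs.length - 1),
      (if pvLiveB cs (R.set p true) j then (1:Int) else 0)
        = (if pvLiveB cs R j then (1:Int) else 0)
          - (if j = p - 1 then (if 0 < p ∧ pvLiveB cs R j then (1:Int) else 0) else 0)
          - (if j = p then (if pvLiveB cs R j then (1:Int) else 0) else 0) := by
    intro j hj
    have e1 : pvLiveB cs (R.set p true) j
        = ((cs.getD j ' ' == cs.getD (j + 1) ' ') && !(if j = p then true else R.getD j false)
            && !(if j + 1 = p then true else R.getD (j + 1) false)) := by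
      unfold pvLiveB; rw [hset j, hset (j + 1)]
    rw [e1]
    by_cases h1 : j = p
    · subst h1
      have h2 : ¬ (j + 1 = j) := by omega
      rcases Nat.eq_zero_or_pos j with hz | hpos
      · subst hz
        simp [pvLiveB]
      · have hne : ¬ (j = j - 1) := by omega
        simp only [if_neg h2, if_neg hne]
        rcases Bool.eq_false_or_eq_true (pvLiveB cs R j) with hb | hb <;> simp [pvLiveB]
    · by_cases h2 : j + 1 = p
      · have hj1 : j = p - 1 := by omega
        have hp0 : 0 < p := by omega
        simp only [if_neg h1, if_pos h2, if_pos hj1, hp0, true_and]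
        rcases Bool.eq_false_or_eq_true (pvLiveB cs R j) with hb | hb <;>
          unfold pvLiveB at hb ⊢ <;> simp
      · have hj1 : ¬ (j = p - 1 ∧ 0 < p) := by omega
        have e3 : pvLiveB cs (R.set p true) j = pvLiveB cs R j := by
          rw [e1, if_neg h1, if_neg h2]; rfl
        rw [← e1, e3]
        by_cases hc : j = p - 1
        · exfalso; omega
        · simp [hc, h1]
  unfold pvCnt
  rw [Finset.sum_congr rfl key, Finset.sum_sub_distrib, Finset.sum_sub_distrib,
    Finset.sum_ite_eq', Finset.sum_ite_eq']
  congr 1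
  · congr 1
    by_cases hp0 : 0 < p
    · have hmem : p - 1 ∈ Finset.range (cs.length - 1) := Finset.mem_range.mpr (by omega)
      simp [hmem, hp0]
    · have hp0' : p = 0 := by omega
      subst hp0'
      simp
  · by_cases hlt : p + 1 < cs.length
    · have hmem : p ∈ Finset.range (cs.length - 1) := Finset.mem_range.mpr (by omega)
      simp [hmem, hlt]
    · have hmem : p ∉ Finset.range (cs.length - 1) := by simp only [Finset.mem_range]; omega
      simp [hmem, hlt]

lemma pvTake_eq_map_range (P : List Int) : ∀ n : Nat, n ≤ P.length →
    P.take n = (List.range n).map (fun k => P.getD k 0) := by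
  intro n
  induction n with
  | zero => simp
  | succ n ih =>
    intro hle
    rw [List.range_succ, List.map_append, ← ih (by omega), List.take_add_one]
    simp [List.getElem?_eq_getElem (by omega : n < P.length)]

lemma pvLoop_eq (cs : List Char) (P : List Int) (hq : '?' ∉ cs) :
    ∀ (is : List Int) (R : List Bool) (c : Int),
      R.length = cs.length → c = pvCnt cs R →
      (∀ i ∈ is, ∃ p : Nat, PySem.List.pyGetD P i 0 = (p : Int) ∧ p < cs.length ∧ R.getD p false = false) →
      List.Pairwise (fun i i' => PySem.List.pyGetD P i 0 ≠ PySem.List.pyGetD P i' 0) is →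
      pvALoop P (cs.length : Int) is (pvMask cs R) c = pvBLoop cs P is R := by
  intro is
  induction is with
  | nil => intro R c _ _ _ _; rfl
  | cons i is ih =>
    intro R c hlen hc hall hpw
    obtain ⟨p, hpe, hplt, hpR⟩ := hall i (List.mem_cons_self)
    simp only [pvALoop, pvBLoop, hpe]
    simp only [PySem.List.pySetD_natCast]
    simp only [pvLeft_iff cs R p hlen hplt hpR hq, pvRight_iff cs R p hlen hplt hpR hq]
    have hc2 :
        (if (p : Int) ≠ (cs.length : Int) - 1 ∧ False then (0:Int) else 0) = 0 := by simp
    have hcons2 :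
        (if p + 1 < cs.length ∧ pvLiveB cs R p = true then
            (if 0 < p ∧ pvLiveB cs R (p - 1) = true then c - 1 else c) - 1
          else (if 0 < p ∧ pvLiveB cs R (p - 1) = true then c - 1 else c))
          = pvCnt cs (R.set p true) := by
      rw [pvCnt_set cs R p hlen hplt hpR, ← hc]
      split_ifs <;> ring
    rw [hcons2]
    have hlive : (pvBLive cs (R.set p true) = false) ↔ pvCnt cs (R.set p true) = 0 :=
      pvBLive_false_iff cs (R.set p true)
    by_cases hz : pvCnt cs (R.set p true) = 0
    · rw [if_pos hz, if_pos (hlive.mpr hz)]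
    · rw [if_neg hz, if_neg (fun hcontr => hz (hlive.mp hcontr))]
      rw [pvMask_set]
      refine ih (R.set p true) _ (by simpa using hlen) rfl ?_ hpw.of_cons
      intro i' hi'
      obtain ⟨p', hpe', hplt', hpR'⟩ := hall i' (List.mem_cons_of_mem _ hi')
      refine ⟨p', hpe', hplt', ?_⟩
      have hne : p' ≠ p := by
        intro hcontr
        exact (List.pairwise_cons.mp hpw).1 i' hi' (by rw [hpe, hpe', hcontr])
      rw [pvGetD_set R p (hlen ▸ hplt) p', if_neg hne]
      exact hpR'

-- ===== VERDICT (by name: the statement is the Claim_ definition above) =====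
theorem getMinimumDays_spec : Claim_equal_getMinimumDays := by
  intro N S P _ hPre
  unfold Spec_getMinimumDays getMinimumDays getMinimumDays_alt
  set cs := S.toList with hcs
  set n := cs.length with hn
  have hR0 : (List.replicate n false).length = n := by simp
  have hcnt0 := pvAConsCount_eq cs
  have hlive0 := pvBLive_false_iff cs (List.replicate n false)
  rcases hPre with hN0 | hch | ⟨hN, hNP, hrange, hnodup, hq⟩
  · -- N ≤ 0: the day loop is empty on both sides
    by_cases hz : pvCnt cs (List.replicate n false) = 0
    · rw [if_pos (by rw [hcnt0]; exact hz), if_pos (hlive0.mpr hz)]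
    · rw [if_neg (by rw [hcnt0]; exact hz), if_neg (fun hcontr => hz (hlive0.mp hcontr)),
        PySem.List.pyRange_one_eq_nil hN0]
      rfl
  · -- no adjacent equal chars: both return 0 at once
    have hz : pvCnt cs (List.replicate n false) = 0 := by
      refine Finset.sum_eq_zero (fun j hj => ?_)
      have hj' : j < n - 1 := Finset.mem_range.mp hj
      have h2 : j + 1 < n := by omega
      have hne : cs[j] ≠ cs[j + 1] := List.isChain_iff_getElem.mp hch j (by omega)
      have : pvLiveB cs (List.replicate n false) j = false := by
        simp [pvLiveB, -List.getD_eq_getElem?_getD,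
          List.getD_eq_getElem _ _ (by omega : j < cs.length),
          List.getD_eq_getElem _ _ h2, hne]
      simp [this]
    rw [if_pos (by rw [hcnt0]; exact hz), if_pos (hlive0.mpr hz)]
  · -- the natural domain: the loop invariant proof
    rw [← hcs] at hN hrange hnodup hq
    rw [← hn] at hN hrange hnodup
    by_cases hz : pvCnt cs (List.replicate n false) = 0
    · rw [if_pos (by rw [hcnt0]; exact hz), if_pos (hlive0.mpr hz)]
    · rw [if_neg (by rw [hcnt0]; exact hz), if_neg (fun hcontr => hz (hlive0.mp hcontr))]
      subst hN
      have hmask := pvMask_replicate cs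
      calc pvALoop P (n : Int) (PySem.List.pyRange 0 (n : Int) 1) cs (pvAConsCount cs)
          = pvALoop P (n : Int) (PySem.List.pyRange 0 (n : Int) 1)
              (pvMask cs (List.replicate n false)) (pvCnt cs (List.replicate n false)) := by
            rw [hmask, hcnt0]
        _ = pvBLoop cs P (PySem.List.pyRange 0 (n : Int) 1) (List.replicate n false) := by
            refine pvLoop_eq cs P hq _ _ _ hR0 rfl ?_ ?_
            · intro i hi
              obtain ⟨h0, hlt⟩ := PySem.List.mem_pyRange_one.mp hi
              have hiP : i.toNat < P.length := by omega
              have hin : i.toNat < n := by omega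
              have hmem : P.getD i.toNat 0 ∈ P.take n := by
                have htl : i.toNat < (P.take n).length := by
                  simp only [List.length_take]; omega
                rw [List.getD_eq_getElem _ _ hiP,
                  ← List.getElem_take (xs := P) (j := n) (i := i.toNat) (h := htl)]
                exact List.getElem_mem _
              obtain ⟨hp0, hplt⟩ := hrange _ hmem
              refine ⟨(P.getD i.toNat 0).toNat, ?_, by omega, ?_⟩
              · rw [PySem.List.pyGetD_of_nonneg _ _ h0, Int.toNat_of_nonneg hp0]
              · exact List.getD_replicate _ (by omega)
            · have hmap : (PySem.List.pyRange 0 (n : Int) 1).map (fun i => PySem.List.pyGetD P i 0)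
                  = P.take n := by
                rw [PySem.List.pyRange_one, List.map_map,
                  pvTake_eq_map_range P n (by omega)]
                have : ((n : Int) - 0).toNat = n := by omega
                rw [this]
                refine List.map_congr_left (fun k hk => ?_)
                have : ((0 : Int) + (k : Int)) = ((k : Nat) : Int) := by ring
                simp only [Function.comp_apply, this, PySem.List.pyGetD_natCast]
              have := hnodup
              rw [← hmap] at this
              exact List.pairwise_map.mp this
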